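-- pv_equiv track=rewrite | github.com/ariuk44/retake_exam_prep | day_10.py | isTrivalent1
-- ===== SOURCE A (Python) =====
-- def isTrivalent1(arr):
--     if len(arr) < 3:
--         return 0
--     i = 0
--     count = 0
--     while i < len(arr):
--         j = 0
--         found = 0
--         while j < i:
--             if arr[j] == arr[i]:
--                 found = 1
--                 break
--             j += 1
--         if found == 0:
--             count += 1
--             if count > 3:
--                 return 0
--         i += 1
--     return 1 if count == 3 else 0
-- ===== SOURCE B (Python) =====
-- def isTrivalent1(arr):
--     s = sorted(arr)
--     if not s:
--         return 0
--     distinct = 1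
--     prev = s[0]
--     for x in s[1:]:
--         if x != prev:
--             distinct += 1
--             prev = x
--     return 1 if distinct == 3 else 0
-- ===== Notes on version B (the rewrite author's own statement) =====
-- stated objective: alternative
-- what changed: Replaces the quadratic nested index scan (for each i, rescan arr[0:i] for a duplicate) by sort-then-single-scan: sort a copy, count a new distinct value whenever an element differs from its predecessor, return 1 iff that count is 3; the redundant len<3 guard disappears; A's early exit once a 4th distinct value appears makes A fast on typical inputs, so B trades that for a simpler O(n log n) scan.
import Mathlib
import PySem

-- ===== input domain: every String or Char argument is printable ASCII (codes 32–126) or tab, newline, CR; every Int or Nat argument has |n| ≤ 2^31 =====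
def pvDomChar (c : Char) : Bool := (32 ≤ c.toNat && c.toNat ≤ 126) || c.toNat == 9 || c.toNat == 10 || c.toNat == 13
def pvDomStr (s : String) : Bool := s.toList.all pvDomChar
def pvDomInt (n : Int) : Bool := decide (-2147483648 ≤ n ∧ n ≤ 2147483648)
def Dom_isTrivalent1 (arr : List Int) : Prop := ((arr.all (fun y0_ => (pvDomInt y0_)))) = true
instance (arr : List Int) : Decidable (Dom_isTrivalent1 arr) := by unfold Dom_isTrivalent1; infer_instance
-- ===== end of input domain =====

-- B replaces A's nested duplicate scan by sort-then-single-scan (an alternative algorithm, not measured faster).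


-- ===== PORT A =====
-- inner while loop: scan j = 0 .. i-1 for arr[j] == arr[i]; returns the Python 'found' flag.
-- (arr.getD _ 0 is exact for Python's arr[_] here: A only indexes with j < i < len(arr), always in range.)
def aFound (arr : List Int) (i j : Nat) : Nat :=
  if j < i then
    if arr.getD j 0 = arr.getD i 0 then 1
    else aFound arr i (j + 1)
  else 0
termination_by i - j

-- outer while loop over i with the running 'count' and the early 'return 0' once count > 3
def aLoop (arr : List Int) (i : Nat) (count : Nat) : Int :=
  if i < arr.length then
    if aFound arr i 0 = 0 then
      if count + 1 > 3 then 0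
      else aLoop arr (i + 1) (count + 1)
    else aLoop arr (i + 1) count
  else if count = 3 then 1 else 0
termination_by arr.length - i

def isTrivalent1 (arr : List Int) : Int :=
  if arr.length < 3 then 0 else aLoop arr 0 0

-- ===== PORT B =====
def isTrivalent1_alt (arr : List Int) : Int :=
  let s := PySem.List.sorted arr (fun x => x) false
  match s with
  | [] => 0
  | x :: rest =>
    let st := rest.foldl (fun (st : Nat × Int) y => if y ≠ st.2 then (st.1 + 1, y) else st) (1, x)
    if st.1 = 3 then 1 else 0

-- ===== PRECONDITION & SPEC =====
def Spec_isTrivalent1 (arr : List Int) (out : Int) : Prop := out = isTrivalent1_alt arr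
instance (arr : List Int) (out : Int) : Decidable (Spec_isTrivalent1 arr out) := by unfold Spec_isTrivalent1; infer_instance

-- ===== CLAIM (what is proved, stated in full; the proofs are below) =====
def Claim_equal_isTrivalent1 : Prop := ∀ (arr : List Int), Dom_isTrivalent1 arr → Spec_isTrivalent1 arr (isTrivalent1 arr)

-- ===== LEMMAS AND PROOFS =====

-- number of "changes" in B's scan, as a structural recursion
def chg (prev : Int) : List Int → Nat
  | [] => 0
  | x :: xs => (if x ≠ prev then 1 else 0) + chg x xs

theorem foldl_fst (rest : List Int) : ∀ (c : Nat) (prev : Int),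
    (rest.foldl (fun (st : Nat × Int) y => if y ≠ st.2 then (st.1 + 1, y) else st) (c, prev)).1
      = c + chg prev rest := by
  induction rest with
  | nil => intro c prev; simp [chg]
  | cons x xs ih =>
    intro c prev
    rw [List.foldl_cons]
    by_cases h : x = prev
    · rw [if_neg (by simp [h]), ih]
      simp [chg, h]
    · rw [if_pos (by simp [h]),
        show (((c, prev).1 + 1, x) : Nat × Int) = (c + 1, x) from rfl, ih]
      simp only [chg, h, ne_eq, not_false_iff, if_pos]
      omega

theorem chg_sorted : ∀ (rest : List Int) (prev : Int),
    (prev :: rest).Pairwise (· ≤ ·) → 1 + chg prev rest = (prev :: rest).toFinset.card := by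
  intro rest
  induction rest with
  | nil => intro prev _; simp [chg]
  | cons x xs ih =>
    intro prev hp
    have hp' : (x :: xs).Pairwise (· ≤ ·) := hp.of_cons
    by_cases h : x = prev
    · have hfe : (prev :: x :: xs).toFinset = (x :: xs).toFinset := by
        subst h; simp
      rw [hfe, ← ih x hp']
      simp [chg, h]
    · have hle : prev ≤ x := (List.pairwise_cons.mp hp).1 x (by simp)
      have hlt : prev < x := lt_of_le_of_ne hle (fun e => h e.symm)
      have hnot : prev ∉ insert x xs.toFinset := by
        simp only [Finset.mem_insert, List.mem_toFinset]
        rintro (rfl | hmem)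
        · exact absurd rfl h
        · have := (List.pairwise_cons.mp hp').1 prev hmem
          omega
      have hcard : (prev :: x :: xs).toFinset.card = (x :: xs).toFinset.card + 1 := by
        simp only [List.toFinset_cons]
        rw [Finset.card_insert_of_notMem hnot]
      rw [hcard, ← ih x hp']
      simp only [chg, h, ne_eq, not_false_iff, if_pos]
      omega

theorem alt_eq (arr : List Int) :
    isTrivalent1_alt arr = if arr.toFinset.card = 3 then 1 else 0 := by
  unfold isTrivalent1_alt
  cases hs : PySem.List.sorted arr (fun x => x) false with
  | nil =>
    have he : arr = [] := (PySem.List.sorted_eq_nil_iff arr _ false).mp hs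
    subst he; simp
  | cons x rest =>
    have hperm : (x :: rest).Perm arr := hs ▸ PySem.List.sorted_perm arr (fun x => x) false
    have hfin : (x :: rest).toFinset = arr.toFinset := List.toFinset_eq_of_perm _ _ hperm
    have hpw : (x :: rest).Pairwise (fun a b => a ≤ b) := by
      have hq := PySem.List.sorted_pairwise (xs := arr) (key := fun x => x)
      rw [hs] at hq
      exact hq
    simp only [foldl_fst, chg_sorted rest x hpw, hfin]

-- A-side: the inner scan finds nothing iff arr[i] does not occur among the first i elements
theorem aFound_zero_iff (arr : List Int) (i : Nat) : ∀ j, aFound arr i j = 0 ↔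
    ∀ k, j ≤ k → k < i → arr.getD k 0 ≠ arr.getD i 0 := by
  intro j
  induction hd : i - j generalizing j with
  | zero =>
    have hnl : ¬ j < i := by omega
    rw [aFound]
    simp only [hnl, if_false]
    constructor
    · intro _ k hk1 hk2
      exact absurd hk2 (by omega)
    · intro _; trivial
  | succ d ih =>
    have hj : j < i := by omega
    rw [aFound]
    simp only [hj, if_true]
    by_cases he : arr.getD j 0 = arr.getD i 0
    · simp only [he, if_true]
      constructor
      · intro h; omega
      · intro h
        exact absurd he (h j le_rfl hj)
    · simp only [he, if_false]
      rw [ih (j + 1) (by omega)]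
      constructor
      · intro h k hk1 hk2
        rcases Nat.eq_or_lt_of_le hk1 with rfl | hlt
        · exact he
        · exact h k hlt hk2
      · intro h k hk1 hk2; exact h k (by omega) hk2

theorem mem_take_iff (arr : List Int) (i : Nat) (a : Int) :
    a ∈ arr.take i ↔ ∃ k, k < i ∧ k < arr.length ∧ arr.getD k 0 = a := by
  constructor
  · intro h
    obtain ⟨k, hk, he⟩ := List.mem_iff_getElem.mp h
    have hk2 : k < i ∧ k < arr.length := by
      rw [List.length_take] at hk; omega
    refine ⟨k, hk2.1, hk2.2, ?_⟩
    rw [List.getD_eq_getElem arr 0 hk2.2, ← he, List.getElem_take]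
  · rintro ⟨k, hk, hk', he⟩
    rw [← he, List.getD_eq_getElem arr 0 hk']
    exact List.mem_iff_getElem.mpr
      ⟨k, by rw [List.length_take]; omega, List.getElem_take⟩

theorem card_take_succ (arr : List Int) (i : Nat) (hi : i < arr.length) :
    (arr.take (i + 1)).toFinset.card
      = (arr.take i).toFinset.card + (if arr.getD i 0 ∈ arr.take i then 0 else 1) := by
  have ht : arr.take (i + 1) = arr.take i ++ [arr[i]] := by
    rw [List.take_add_one]
    simp [List.getElem?_eq_getElem hi]
  have hg : arr.getD i 0 = arr[i] := List.getD_eq_getElem arr 0 hi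
  by_cases hm : arr.getD i 0 ∈ arr.take i
  · rw [if_pos hm, ht]
    have hmem : arr[i] ∈ (arr.take i).toFinset := by
      rw [← hg]; exact List.mem_toFinset.mpr hm
    have : (arr.take i ++ [arr[i]]).toFinset = (arr.take i).toFinset := by
      rw [List.toFinset_append]
      simp only [List.toFinset_cons, List.toFinset_nil, insert_empty_eq]
      exact Finset.union_eq_left.mpr (Finset.singleton_subset_iff.mpr hmem)
    rw [this]
    omega
  · rw [if_neg hm, ht]
    have hmem : arr[i] ∉ (arr.take i).toFinset := by
      rw [← hg]; simpa using hm
    rw [List.toFinset_append]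
    simp only [List.toFinset_cons, List.toFinset_nil, insert_empty_eq]
    rw [Finset.union_comm, ← Finset.insert_eq, Finset.card_insert_of_notMem hmem]

theorem card_take_le (arr : List Int) (i : Nat) :
    (arr.take i).toFinset.card ≤ arr.toFinset.card :=
  Finset.card_le_card (fun a ha => by
    simp only [List.mem_toFinset] at *
    exact List.mem_of_mem_take ha)

theorem aLoop_eq (arr : List Int) : ∀ (d i : Nat) (count : Nat), arr.length - i = d →
    i ≤ arr.length → count = (arr.take i).toFinset.card →
    aLoop arr i count = if arr.toFinset.card = 3 then 1 else 0 := by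
  intro d
  induction d with
  | zero =>
    intro i count hd hi hc
    have hie : i = arr.length := by omega
    rw [aLoop]
    simp only [hie, lt_irrefl, if_false]
    subst hie
    rw [List.take_length] at hc
    subst hc
    rfl
  | succ d ih =>
    intro i count hd hi hc
    have hlt : i < arr.length := by omega
    rw [aLoop]
    simp only [hlt, if_true]
    by_cases hf : aFound arr i 0 = 0
    · have hnm : arr.getD i 0 ∉ arr.take i := by
        rw [aFound_zero_iff] at hf
        intro hmem
        obtain ⟨k, hk, hk', he⟩ := (mem_take_iff arr i _).mp hmem
        exact hf k (Nat.zero_le k) hk he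
      have hstep : (arr.take (i + 1)).toFinset.card = count + 1 := by
        rw [card_take_succ arr i hlt, if_neg hnm, ← hc]
      simp only [hf, if_true]
      by_cases hb : count + 1 > 3
      · have hge : 4 ≤ arr.toFinset.card := by
          have := card_take_le arr (i + 1)
          omega
        rw [if_pos hb]
        have hne : arr.toFinset.card ≠ 3 := by omega
        simp [hne]
      · rw [if_neg hb]
        exact ih (i + 1) (count + 1) (by omega) hlt hstep.symm
    · have hmem : arr.getD i 0 ∈ arr.take i := by
        by_contra hnm
        apply hf
        rw [aFound_zero_iff]
        intro k _ hk he
        exact hnm ((mem_take_iff arr i _).mpr ⟨k, hk, by omega, he⟩)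
      have hstep : (arr.take (i + 1)).toFinset.card = count := by
        rw [card_take_succ arr i hlt, if_pos hmem, ← hc]
        omega
      simp only [hf, if_false]
      exact ih (i + 1) count (by omega) hlt hstep.symm

theorem a_eq (arr : List Int) :
    isTrivalent1 arr = if arr.toFinset.card = 3 then 1 else 0 := by
  unfold isTrivalent1
  by_cases h : arr.length < 3
  · have hle : arr.toFinset.card ≤ arr.length := arr.toFinset_card_le
    have hne : arr.toFinset.card ≠ 3 := by omega
    simp [h, hne]
  · simp only [h, if_false]
    exact aLoop_eq arr arr.length 0 0 (by omega) (Nat.zero_le _) (by simp)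

-- ===== VERDICT (by name: the statement is the Claim_ definition above) =====
theorem isTrivalent1_spec : Claim_equal_isTrivalent1 := by
  intro arr _
  unfold Spec_isTrivalent1
  rw [a_eq, alt_eq]
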